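-- pv_equiv track=rewrite | github.com/miemiekurisu/python-pdfresize | scanmodule/generalscan.py | scalbox
-- ===== SOURCE A (Python) =====
-- def scalbox(imglist):
--     listtmp=[]
--     flag=0
--     for i in range(0,len(imglist)):
--         a = imglist[i]
--         if (flag==0) & (a!=0):
--             listtmp.append(i)
--             flag=1
--         elif(flag!=0)&(a==0):
--             listtmp.append(i)
--             flag=0
--     dictheight={}
--     dictwhiteheight={}
--     for i in range(1,len(listtmp)):
--         if i%2==1:
--             dictheight[listtmp[i-1]]=listtmp[i]-listtmp[i-1]
--         else:
--             dictwhiteheight[listtmp[i-1]]=listtmp[i]-listtmp[i-1]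
--     #listavg = getavg(dictheight)
--     return dictheight,dictwhiteheight
-- ===== SOURCE B (Python) =====
-- def scalbox(imglist):
--     runs = {}
--     gaps = {}
--     in_run = False
--     seen = False
--     prev = 0
--     for i, a in enumerate(imglist):
--         if in_run:
--             if a == 0:
--                 runs[prev] = i - prev
--                 prev = i
--                 in_run = False
--         elif a != 0:
--             if seen:
--                 gaps[prev] = i - prev
--             prev = i
--             in_run = True
--             seen = True
--     return runs, gaps
-- ===== Notes on version B (the rewrite author's own statement) =====
-- stated objective: simpler
-- what changed: Replaced A's two-pass scheme (collect a boundary-index list, then a parity-indexed second loop pairing consecutive boundaries into the two dicts) by one single pass that keeps an in_run flag and the last boundary prev, emitting a run length or gap length directly at each toggle; the intermediate list and the second loop disappear, and the still-open final run is naturally never emitted, matching A.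
import Mathlib
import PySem

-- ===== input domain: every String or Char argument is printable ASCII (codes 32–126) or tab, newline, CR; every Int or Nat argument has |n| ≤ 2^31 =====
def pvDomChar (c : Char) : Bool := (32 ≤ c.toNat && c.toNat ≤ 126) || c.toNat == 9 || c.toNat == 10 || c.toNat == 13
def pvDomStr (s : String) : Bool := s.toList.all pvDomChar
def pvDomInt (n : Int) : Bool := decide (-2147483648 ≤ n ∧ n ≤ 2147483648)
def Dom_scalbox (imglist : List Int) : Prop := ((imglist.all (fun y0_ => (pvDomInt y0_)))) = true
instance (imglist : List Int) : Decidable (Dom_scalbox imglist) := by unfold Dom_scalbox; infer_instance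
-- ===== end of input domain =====

-- ===== PORT A =====
-- B merges A's two passes (boundary list + parity-indexed pairing) into one stateful scan; objective: simpler one-pass decomposition.
-- first loop of A: collect toggle boundary indices into listtmp (built here by cons-returning recursion)
def scalboxRuns : List Int → Int → Int → List Int
  | [], _, _ => []
  | a :: rest, i, flag =>
    if (flag == 0) && (a != 0) then i :: scalboxRuns rest (i + 1) 1
    else if (flag != 0) && (a == 0) then i :: scalboxRuns rest (i + 1) 0
    else scalboxRuns rest (i + 1) flag

-- second loop of A: pair consecutive boundaries, parity of the counter picks the dict
def scalboxPairs : List Int → Int → PySem.Dict Int Int → PySem.Dict Int Int →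
    PySem.Dict Int Int × PySem.Dict Int Int
  | t0 :: t1 :: rest, i, dh, dw =>
    if PySem.Int.mod i 2 == 1 then scalboxPairs (t1 :: rest) (i + 1) (dh.insert t0 (t1 - t0)) dw
    else scalboxPairs (t1 :: rest) (i + 1) dh (dw.insert t0 (t1 - t0))
  | _, _, dh, dw => (dh, dw)

def scalbox (imglist : List Int) : (List (Int × Int)) × (List (Int × Int)) :=
  let r := scalboxPairs (scalboxRuns imglist 0 0) 1 PySem.Dict.empty PySem.Dict.empty
  (r.1.items, r.2.items)

-- ===== PORT B =====
-- single pass: in_run / seen / prev state, emitting a run or gap length at each toggle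
def scalboxAltLoop : List Int → Int → Bool → Bool → Int → PySem.Dict Int Int →
    PySem.Dict Int Int → PySem.Dict Int Int × PySem.Dict Int Int
  | [], _, _, _, _, runs, gaps => (runs, gaps)
  | a :: rest, i, inRun, seen, prev, runs, gaps =>
    if inRun then
      if a == 0 then scalboxAltLoop rest (i + 1) false seen i (runs.insert prev (i - prev)) gaps
      else scalboxAltLoop rest (i + 1) inRun seen prev runs gaps
    else if a != 0 then
      scalboxAltLoop rest (i + 1) true true i runs
        (if seen then gaps.insert prev (i - prev) else gaps)
    else scalboxAltLoop rest (i + 1) inRun seen prev runs gaps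

def scalbox_alt (imglist : List Int) : (List (Int × Int)) × (List (Int × Int)) :=
  let r := scalboxAltLoop imglist 0 false false 0 PySem.Dict.empty PySem.Dict.empty
  (r.1.items, r.2.items)

-- ===== PRECONDITION & SPEC =====
def Spec_scalbox (imglist : List Int) (out : (List (Int × Int)) × (List (Int × Int))) : Prop := out = scalbox_alt imglist
instance (imglist : List Int) (out : (List (Int × Int)) × (List (Int × Int))) : Decidable (Spec_scalbox imglist out) := by unfold Spec_scalbox; infer_instance

-- ===== CLAIM (what is proved, stated in full; the proofs are below) =====
def Claim_equal_scalbox : Prop := ∀ (imglist : List Int), Dom_scalbox imglist → Spec_scalbox imglist (scalbox imglist)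

-- ===== LEMMAS AND PROOFS =====
-- scalboxPairs only consults the parity of its counter
theorem scalboxPairs_parity (l : List Int) : ∀ (k k' : Int) (dh dw : PySem.Dict Int Int),
    PySem.Int.mod k 2 = PySem.Int.mod k' 2 →
    scalboxPairs l k dh dw = scalboxPairs l k' dh dw := by
  induction l with
  | nil => intro k k' dh dw h; rfl
  | cons t0 rest ih =>
    intro k k' dh dw h
    cases rest with
    | nil => rfl
    | cons t1 rest' =>
      have h2 : PySem.Int.mod (k + 1) 2 = PySem.Int.mod (k' + 1) 2 := by
        rw [PySem.Int.mod_eq_emod_of_pos (by norm_num), PySem.Int.mod_eq_emod_of_pos (by norm_num)] at h ⊢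
        omega
      simp only [scalboxPairs, h]
      split <;> exact ih _ _ _ _ h2

-- the one-pass loop equals A's pairing applied to the pending boundary context plus future boundaries
theorem scalboxAltLoop_eq (xs : List Int) : ∀ (i prev : Int) (runs gaps : PySem.Dict Int Int),
    (scalboxAltLoop xs i false false prev runs gaps
       = scalboxPairs (scalboxRuns xs i 0) 1 runs gaps)
    ∧ (scalboxAltLoop xs i true true prev runs gaps
       = scalboxPairs (prev :: scalboxRuns xs i 1) 1 runs gaps)
    ∧ (scalboxAltLoop xs i false true prev runs gaps
       = scalboxPairs (prev :: scalboxRuns xs i 0) 2 runs gaps) := by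
  induction xs with
  | nil =>
    intro i prev runs gaps
    refine ⟨rfl, ?_, ?_⟩ <;> simp [scalboxAltLoop, scalboxRuns, scalboxPairs]
  | cons a rest ih =>
    intro i prev runs gaps
    by_cases ha : a = 0
    · subst ha
      refine ⟨?_, ?_, ?_⟩
      · simpa [scalboxAltLoop, scalboxRuns] using (ih (i + 1) prev runs gaps).1
      · -- run closes: emit into runs, boundary i appended after prev
        simp [scalboxAltLoop, scalboxRuns, scalboxPairs]
        exact (ih (i + 1) i (runs.insert prev (i - prev)) gaps).2.2
      · simpa [scalboxAltLoop, scalboxRuns] using (ih (i + 1) prev runs gaps).2.2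
    · refine ⟨?_, ?_, ?_⟩
      · -- first nonzero ever: open a run at i, no emission
        simp only [scalboxAltLoop, scalboxRuns]
        simp [ha]
        exact (ih (i + 1) i runs gaps).2.1
      · simpa [scalboxAltLoop, scalboxRuns, ha] using (ih (i + 1) prev runs gaps).2.1
      · -- gap closes: emit into gaps, counter parity 2 → even branch, then restart at odd
        simp only [scalboxAltLoop, scalboxRuns]
        simp [ha, scalboxPairs]
        calc scalboxAltLoop rest (i + 1) true true i runs (gaps.insert prev (i - prev))
            = scalboxPairs (i :: scalboxRuns rest (i + 1) 1) 1 runs (gaps.insert prev (i - prev)) :=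
              (ih (i + 1) i runs (gaps.insert prev (i - prev))).2.1
          _ = scalboxPairs (i :: scalboxRuns rest (i + 1) 1) 3 runs (gaps.insert prev (i - prev)) :=
              scalboxPairs_parity _ 1 3 _ _ (by decide)

-- ===== VERDICT (by name: the statement is the Claim_ definition above) =====
theorem scalbox_spec : Claim_equal_scalbox := by
  intro imglist _
  unfold Spec_scalbox scalbox scalbox_alt
  rw [(scalboxAltLoop_eq imglist 0 0 PySem.Dict.empty PySem.Dict.empty).1]
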